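-- pv_equiv track=rewrite | github.com/hqers/surveyprep | surveyprep/tools/adapter_generator.py | _pick_sheet
-- ===== SOURCE A (Python) =====
-- def _pick_sheet(sheets: list[str], hint: str) -> str:
--     """Pilih sheet RT atau IND dari daftar sheet."""
--     hint_upper = hint.upper()
--     if hint_upper:
--         for s in sheets:
--             if hint_upper in s.upper():
--                 return s
--     # Preferensikan sheet RT
--     for keyword in ['RT', 'KOR', 'RUMAH']:
--         for s in sheets:
--             if keyword in s.upper():
--                 return s
--     return sheets[0]
-- ===== SOURCE B (Python) =====
-- def _pick_sheet(sheets: list[str], hint: str) -> str: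
--     """Pilih sheet RT atau IND dari daftar sheet."""
--     hu = hint.upper()
--     priorities = ([hu] if hu else []) + ['RT', 'KOR', 'RUMAH']
--     best = None  # (keyword_rank, sheet) with the lowest rank seen so far
--     for s in sheets:
--         su = s.upper()
--         rank = next((k for k, kw in enumerate(priorities) if kw in su), None)
--         if rank is not None and (best is None or rank < best[0]):
--             best = (rank, s)
--     return best[1] if best is not None else sheets[0]
-- ===== Notes on version B (the rewrite author's own statement) =====
-- stated objective: alternative
-- what changed: Replaces A's keyword-major nested loops (one scan of the sheets per keyword) by a single sheet-major pass that ranks each sheet by the first priority keyword it contains and keeps the sheet with the lowest rank (ties to the earlier sheet).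
-- outside the precondition, e.g. on _pick_sheet([], 'RT'): A raises IndexError, B raises IndexError
import Mathlib
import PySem

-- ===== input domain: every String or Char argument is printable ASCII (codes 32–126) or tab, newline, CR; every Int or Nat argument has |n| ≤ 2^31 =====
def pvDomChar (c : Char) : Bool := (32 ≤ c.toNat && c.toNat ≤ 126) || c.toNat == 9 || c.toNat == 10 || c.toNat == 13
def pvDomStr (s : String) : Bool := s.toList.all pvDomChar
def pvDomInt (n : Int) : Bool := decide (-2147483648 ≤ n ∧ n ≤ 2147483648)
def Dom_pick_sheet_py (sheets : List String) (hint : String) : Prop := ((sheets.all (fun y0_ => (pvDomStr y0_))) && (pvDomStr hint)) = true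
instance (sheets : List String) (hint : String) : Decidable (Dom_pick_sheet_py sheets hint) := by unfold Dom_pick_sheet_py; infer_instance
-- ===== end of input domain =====

-- B replaces A's keyword-major nested loops by one sheet-major pass keeping the sheet
-- with the lowest-ranked matching priority keyword (objective: alternative decomposition).
-- Both Pythons raise IndexError on sheets = [] (sheets[0]); Pre_ excludes exactly that.

-- ===== PORT A =====
-- inner 'for s in sheets: if kw in s.upper(): return s'
def pvFindA (kw : String) : List String → Option String
  | [] => none
  | s :: rest => if PySem.Str.isIn kw (PySem.Str.upper s) then some s else pvFindA kw rest

-- outer 'for keyword in [...]' loop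
def pvKwLoopA (sheets : List String) : List String → Option String
  | [] => none
  | kw :: kws =>
    match pvFindA kw sheets with
    | some s => some s
    | none => pvKwLoopA sheets kws

def pick_sheet_py (sheets : List String) (hint : String) : String :=
  let hu := PySem.Str.upper hint
  match (if hu ≠ "" then pvFindA hu sheets else none) with
  | some s => s
  | none =>
    match pvKwLoopA sheets ["RT", "KOR", "RUMAH"] with
    | some s => s
    | none => (PySem.List.pyGet? sheets 0).getD ""  -- sheets[0]; Python raises IndexError on [], excluded by Pre_

-- ===== PORT B =====
-- 'next((k for k, kw in enumerate(priorities) if kw in su), None)'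
def pvRankB (su : String) : List String → Nat → Option Nat
  | [], _ => none
  | kw :: rest, k => if PySem.Str.isIn kw su then some k else pvRankB su rest (k + 1)

-- the single pass over sheets maintaining best = (rank, sheet)
def pvBestB (P : List String) : List String → Option (Nat × String) → Option (Nat × String)
  | [], best => best
  | s :: rest, best =>
    match pvRankB (PySem.Str.upper s) P 0 with
    | none => pvBestB P rest best
    | some r =>
      match best with
      | none => pvBestB P rest (some (r, s))
      | some (br, bs) =>
        if r < br then pvBestB P rest (some (r, s)) else pvBestB P rest (some (br, bs))

def pick_sheet_py_alt (sheets : List String) (hint : String) : String :=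
  let hu := PySem.Str.upper hint
  let priorities := (if hu ≠ "" then [hu] else []) ++ ["RT", "KOR", "RUMAH"]
  match pvBestB priorities sheets none with
  | some (_, s) => s
  | none => (PySem.List.pyGet? sheets 0).getD ""  -- sheets[0]; Python raises IndexError on [], excluded by Pre_

-- ===== PRECONDITION & SPEC =====
-- Pre_ excludes only sheets = [], where both A and B raise IndexError (sheets[0]).
def Pre_pick_sheet_py (sheets : List String) (hint : String) : Prop := sheets ≠ []
instance (sheets : List String) (hint : String) : Decidable (Pre_pick_sheet_py sheets hint) := by unfold Pre_pick_sheet_py; infer_instance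
def pvWitness_pick_sheet_py : List String × String := (["Data", "RT_1"], "IND")

def Spec_pick_sheet_py (sheets : List String) (hint : String) (out : String) : Prop := out = pick_sheet_py_alt sheets hint
instance (sheets : List String) (hint : String) (out : String) : Decidable (Spec_pick_sheet_py sheets hint out) := by unfold Spec_pick_sheet_py; infer_instance

-- ===== CLAIM (what is proved, stated in full; the proofs are below) =====
def Claim_equal_pick_sheet_py : Prop := ∀ (sheets : List String) (hint : String), Dom_pick_sheet_py sheets hint → Pre_pick_sheet_py sheets hint → Spec_pick_sheet_py sheets hint (pick_sheet_py sheets hint)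

-- ===== LEMMAS AND PROOFS =====

-- a rank accumulator started one later is the shifted rank
theorem pvRankB_shift (P : List String) (su : String) (k : Nat) :
    pvRankB su P (k + 1) = Option.map (· + 1) (pvRankB su P k) := by
  induction P generalizing k with
  | nil => rfl
  | cons kw rest ih =>
    simp only [pvRankB]
    split
    · rfl
    · exact ih (k + 1)

-- a best of rank 0 is never replaced
theorem pvBestB_zero (P : List String) (sheets : List String) (s : String) :
    pvBestB P sheets (some (0, s)) = some (0, s) := by
  induction sheets with
  | nil => rfl
  | cons t tl ih =>
    simp only [pvBestB]
    split
    · exact ih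
    · simp only [Nat.not_lt_zero, if_false]
      exact ih

-- if no sheet matches the head keyword, the pass over (kw :: rest) is the pass over rest with all ranks shifted
theorem pvBestB_lift (kw : String) (rest : List String) (sheets : List String)
    (best : Option (Nat × String)) (h : pvFindA kw sheets = none) :
    pvBestB (kw :: rest) sheets (Option.map (fun p => (p.1 + 1, p.2)) best)
      = Option.map (fun p => (p.1 + 1, p.2)) (pvBestB rest sheets best) := by
  induction sheets generalizing best with
  | nil => rfl
  | cons s tl ih =>
    simp only [pvFindA] at h
    by_cases hm : PySem.Str.isIn kw (PySem.Str.upper s) = true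
    · rw [if_pos hm] at h; cases h
    · simp only [hm, if_false, Bool.false_eq_true] at h
      simp only [pvBestB, pvRankB, hm, if_false, Bool.false_eq_true,
        pvRankB_shift rest (PySem.Str.upper s) 0]
      cases hr : pvRankB (PySem.Str.upper s) rest 0 with
      | none => exact ih best h
      | some r =>
        simp only [Option.map_some]
        cases best with
        | none => exact ih (some (r, s)) h
        | some p =>
          obtain ⟨br, bs⟩ := p
          simp only [Option.map_some, Nat.add_lt_add_iff_right]
          split
          · exact ih (some (r, s)) h
          · exact ih (some (br, bs)) h

-- if some sheet matches the head keyword, the pass returns the first such sheet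
theorem pvBestB_first (kw : String) (rest : List String) (sheets : List String)
    (s0 : String) (best : Option (Nat × String))
    (hf : pvFindA kw sheets = some s0)
    (hb : best = none ∨ ∃ br bs, best = some (br, bs) ∧ 1 ≤ br) :
    pvBestB (kw :: rest) sheets best = some (0, s0) := by
  induction sheets generalizing best with
  | nil => simp [pvFindA] at hf
  | cons s tl ih =>
    simp only [pvFindA] at hf
    by_cases hm : PySem.Str.isIn kw (PySem.Str.upper s) = true
    · simp only [hm, if_true] at hf
      obtain rfl : s = s0 := by injection hf
      simp only [pvBestB, pvRankB, hm, if_true]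
      rcases hb with rfl | ⟨br, bs, rfl, hbr⟩
      · exact pvBestB_zero _ _ _
      · simp only [show (0 < br) = True by simp [Nat.lt_of_lt_of_le Nat.zero_lt_one hbr], if_true]
        exact pvBestB_zero _ _ _
    · simp only [hm, if_false, Bool.false_eq_true] at hf
      simp only [pvBestB, pvRankB, hm, if_false, Bool.false_eq_true,
        pvRankB_shift rest (PySem.Str.upper s) 0]
      cases hr : pvRankB (PySem.Str.upper s) rest 0 with
      | none => exact ih best hf hb
      | some r =>
        simp only [Option.map_some]
        rcases hb with rfl | ⟨br, bs, rfl, hbr⟩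
        · exact ih (some (r + 1, s)) hf (Or.inr ⟨r + 1, s, rfl, Nat.le_add_left 1 r⟩)
        · show (if r + 1 < br then pvBestB (kw :: rest) tl (some (r + 1, s))
              else pvBestB (kw :: rest) tl (some (br, bs))) = some (0, s0)
          by_cases hlt : r + 1 < br
          · rw [if_pos hlt]
            exact ih (some (r + 1, s)) hf (Or.inr ⟨r + 1, s, rfl, Nat.le_add_left 1 r⟩)
          · rw [if_neg hlt]
            exact ih (some (br, bs)) hf (Or.inr ⟨br, bs, rfl, hbr⟩)

-- with no keywords the pass never updates the accumulator
theorem pvBestB_nil (sheets : List String) (best : Option (Nat × String)) :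
    pvBestB [] sheets best = best := by
  induction sheets generalizing best with
  | nil => rfl
  | cons s tl ih => simpa only [pvBestB, pvRankB] using ih best

-- one-step unfolding of A's outer loop
theorem pvKwLoopA_cons (sheets : List String) (kw : String) (kws : List String) :
    pvKwLoopA sheets (kw :: kws)
      = match pvFindA kw sheets with
        | some s => some s
        | none => pvKwLoopA sheets kws := rfl

-- main bridge: A's keyword-major nested loops compute the sheet of B's single-pass best
theorem pvKwLoopA_eq_best (P : List String) (sheets : List String) :
    pvKwLoopA sheets P = Option.map Prod.snd (pvBestB P sheets none) := by
  induction P with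
  | nil => simp [pvKwLoopA, pvBestB_nil]
  | cons kw rest ih =>
    rw [pvKwLoopA_cons]
    cases hf : pvFindA kw sheets with
    | some s0 => rw [pvBestB_first kw rest sheets s0 none hf (Or.inl rfl)]; rfl
    | none =>
      rw [ih]
      have h := pvBestB_lift kw rest sheets none hf
      simp only [Option.map_none] at h
      rw [h]
      cases pvBestB rest sheets none with
      | none => rfl
      | some p => rfl

-- ===== VERDICT (by name: the statement is the Claim_ definition above) =====
theorem pick_sheet_py_spec : Claim_equal_pick_sheet_py := by
  intro sheets hint _ _
  unfold Spec_pick_sheet_py pick_sheet_py pick_sheet_py_alt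
  by_cases hh : PySem.Str.upper hint ≠ ""
  · simp only [if_pos hh, List.cons_append, List.nil_append]
    have hb := pvKwLoopA_eq_best (PySem.Str.upper hint :: ["RT", "KOR", "RUMAH"]) sheets
    rw [pvKwLoopA_cons] at hb
    cases hf : pvFindA (PySem.Str.upper hint) sheets with
    | some s =>
      cases hB : pvBestB (PySem.Str.upper hint :: ["RT", "KOR", "RUMAH"]) sheets none with
      | none => rw [hf, hB] at hb; simp at hb
      | some p => rw [hf, hB] at hb; simp at hb; simp [hb]
    | none =>
      cases hB : pvBestB (PySem.Str.upper hint :: ["RT", "KOR", "RUMAH"]) sheets none with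
      | none => rw [hf, hB] at hb; simp at hb; simp [hb]
      | some p => rw [hf, hB] at hb; simp at hb; simp [hb]
  · simp only [if_neg hh, List.nil_append]
    have hb := pvKwLoopA_eq_best ["RT", "KOR", "RUMAH"] sheets
    cases hB : pvBestB ["RT", "KOR", "RUMAH"] sheets none with
    | none => rw [hB] at hb; simp at hb; simp [hb]
    | some p => rw [hB] at hb; simp at hb; simp [hb]
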